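-- pv_equiv track=rewrite | github.com/Vectorredz/DeetsCode | Algorithms/Matrix/Easy/2639_ColumnWidth.py | findColumnWidth
-- ===== SOURCE A (Python) =====
-- def findColumnWidth(grid: list[list[int]]):
--     rows, cols = len(grid), len(grid[0])
--     maxCol: int = 0
--     ret: list[int] = []
--     for col in range(cols):
--         maxRet: int = 0
--         for row in range(rows):
--             maxCol = len(str(grid[row][col]))
--             maxRet = max(maxRet, maxCol)
--         ret.append(maxRet)
--     return ret
-- ===== SOURCE B (Python) =====
-- def findColumnWidth(grid: list[list[int]]):
--     # row-major single pass maintaining running column maxima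
--     ret = [0] * len(grid[0])
--     for row in grid:
--         ret = [max(m, len(str(x))) for m, x in zip(ret, row)]
--     return ret
-- ===== Notes on version B (the rewrite author's own statement) =====
-- stated objective: alternative
-- what changed: A scans column-major with an inner loop over rows resetting a scalar max per column; B makes a single row-major pass over the rows, maintaining a list of running column maxima updated by zipping each row against it.
import Mathlib
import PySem

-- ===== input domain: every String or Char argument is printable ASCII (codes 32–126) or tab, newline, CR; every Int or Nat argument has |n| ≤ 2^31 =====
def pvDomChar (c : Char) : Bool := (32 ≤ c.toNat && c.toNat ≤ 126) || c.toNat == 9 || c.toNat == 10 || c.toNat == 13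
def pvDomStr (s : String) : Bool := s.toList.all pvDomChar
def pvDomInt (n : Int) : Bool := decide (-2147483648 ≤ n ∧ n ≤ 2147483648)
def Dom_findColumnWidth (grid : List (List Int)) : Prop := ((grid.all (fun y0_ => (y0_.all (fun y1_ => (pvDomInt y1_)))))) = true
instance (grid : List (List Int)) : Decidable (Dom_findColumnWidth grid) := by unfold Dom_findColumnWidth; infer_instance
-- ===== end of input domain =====

-- B replaces A's column-major double loop (scalar max per column) by a single
-- row-major pass maintaining a list of running column maxima; same cost, different traversal.

-- len(str(n)) — the printed width of an integer; used by both ports.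
def pvW (n : Int) : Int := PySem.Str.len (PySem.Int.toStr n)

-- ===== PORT A =====
def findColumnWidth (grid : List (List Int)) : List Int :=
  let rows : Int := PySem.List.len grid
  let cols : Int := PySem.List.len (PySem.List.pyGetD grid 0 [])
  -- maxCol = 0; ret = []
  let st :=
    (PySem.List.pyRange 0 cols 1).foldl
      (fun (st : Int × List Int) col =>
        -- maxRet = 0; for row in range(rows): maxCol = len(str(grid[row][col])); maxRet = max(maxRet, maxCol)
        let inner :=
          (PySem.List.pyRange 0 rows 1).foldl
            (fun (p : Int × Int) row =>
              (pvW (PySem.List.pyGetD (PySem.List.pyGetD grid row []) col 0),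
               max p.2 (pvW (PySem.List.pyGetD (PySem.List.pyGetD grid row []) col 0))))
            (st.1, 0)
        (inner.1, st.2 ++ [inner.2]))
      (0, [])
  st.2

-- ===== PORT B =====
def findColumnWidth_alt (grid : List (List Int)) : List Int :=
  let ret := List.replicate (PySem.List.len (PySem.List.pyGetD grid 0 [])).toNat 0
  grid.foldl (fun ret row => List.zipWith (fun m x => max m (pvW x)) ret row) ret

-- ===== PRECONDITION & SPEC =====
-- Pre_ excludes exactly the inputs where A raises IndexError: the empty grid (grid[0])
-- and ragged grids with some row shorter than the first one (grid[row][col]).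
def Pre_findColumnWidth (grid : List (List Int)) : Prop :=
  grid ≠ [] ∧ ∀ row ∈ grid, (grid.headD []).length ≤ row.length
instance (grid : List (List Int)) : Decidable (Pre_findColumnWidth grid) := by
  unfold Pre_findColumnWidth; infer_instance
def pvWitness_findColumnWidth : List (List Int) := [[1, -23, 456], [7, 8, -9]]

def Spec_findColumnWidth (grid : List (List Int)) (out : List Int) : Prop := out = findColumnWidth_alt grid
instance (grid : List (List Int)) (out : List Int) : Decidable (Spec_findColumnWidth grid out) := by unfold Spec_findColumnWidth; infer_instance

-- ===== CLAIM (what is proved, stated in full; the proofs are below) =====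
def Claim_equal_findColumnWidth : Prop := ∀ (grid : List (List Int)), Dom_findColumnWidth grid → Pre_findColumnWidth grid → Spec_findColumnWidth grid (findColumnWidth grid)

-- ===== LEMMAS AND PROOFS =====

-- the per-column maximum both programs compute
def pvColMax (grid : List (List Int)) (col : Int) : Int :=
  grid.foldl (fun m row => max m (pvW (PySem.List.pyGetD row col 0))) 0

-- the printed width of cell (row, col), indexed pythonically
def pvF (grid : List (List Int)) (col row : Int) : Int :=
  pvW (PySem.List.pyGetD (PySem.List.pyGetD grid row []) col 0)

theorem pv_inner (grid : List (List Int)) (col mc : Int) :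
    ((PySem.List.pyRange 0 (PySem.List.len grid) 1).foldl
        (fun (p : Int × Int) row => (pvF grid col row, max p.2 (pvF grid col row))) (mc, 0)).2
      = pvColMax grid col := by
  rw [PySem.List.foldl_prod_mk (f := fun _ row => pvF grid col row)
        (g := fun acc row => max acc (pvF grid col row))]
  show (PySem.List.pyRange 0 (PySem.List.len grid) 1).foldl
      (fun acc j => max acc (pvW (PySem.List.pyGetD (PySem.List.pyGetD grid j []) col 0))) 0
    = pvColMax grid col
  rw [PySem.List.foldl_pyRange_zero_pyGetD grid []
        (fun m row => max m (pvW (PySem.List.pyGetD row col 0))) 0]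
  rfl

theorem pv_outerA (grid : List (List Int)) (l : List Int) (mc : Int) (acc : List Int) :
    (l.foldl
        (fun (st : Int × List Int) col =>
          let inner :=
            (PySem.List.pyRange 0 (PySem.List.len grid) 1).foldl
              (fun (p : Int × Int) row => (pvF grid col row, max p.2 (pvF grid col row)))
              (st.1, 0)
          (inner.1, st.2 ++ [inner.2])) (mc, acc)).2
      = acc ++ l.map (pvColMax grid) := by
  induction l generalizing mc acc with
  | nil => simp
  | cons c t ih =>
    simp only [List.foldl_cons, List.map_cons]
    rw [ih, pv_inner]
    simp

theorem pv_A_eq_map (grid : List (List Int)) :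
    findColumnWidth grid
      = (PySem.List.pyRange 0 (PySem.List.len (PySem.List.pyGetD grid 0 [])) 1).map
          (pvColMax grid) := by
  show ((PySem.List.pyRange 0 (PySem.List.len (PySem.List.pyGetD grid 0 [])) 1).foldl
      (fun (st : Int × List Int) col =>
        let inner :=
          (PySem.List.pyRange 0 (PySem.List.len grid) 1).foldl
            (fun (p : Int × Int) row => (pvF grid col row, max p.2 (pvF grid col row)))
            (st.1, 0)
        (inner.1, st.2 ++ [inner.2])) (0, [])).2
    = _
  rw [pv_outerA]
  rfl

theorem pv_zip_fold (rs : List (List Int)) (acc : List Int)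
    (h : ∀ r ∈ rs, acc.length ≤ r.length) :
    rs.foldl (fun ret row => List.zipWith (fun m x => max m (pvW x)) ret row) acc
      = (List.range acc.length).map
          (fun c => rs.foldl (fun m row => max m (pvW (row.getD c 0))) (acc.getD c 0)) := by
  induction rs generalizing acc with
  | nil =>
    simp only [List.foldl_nil]
    apply List.ext_getElem
    · simp
    · intro i h1 h2
      simp [List.getD_eq_getElem?_getD, *]
  | cons r t ih =>
    have hr : acc.length ≤ r.length := h r (List.mem_cons_self ..)
    have hlen : (List.zipWith (fun m x => max m (pvW x)) acc r).length = acc.length := by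
      simp [Nat.min_eq_left hr]
    simp only [List.foldl_cons]
    rw [ih _ (fun r' hr' => by rw [hlen]; exact h r' (List.mem_cons_of_mem _ hr'))]
    rw [hlen]
    apply List.map_congr_left
    intro c hc
    have hc' : c < acc.length := List.mem_range.mp hc
    congr 1
    rw [List.getD_eq_getElem _ _ (by omega : c < (List.zipWith (fun m x => max m (pvW x)) acc r).length)]
    rw [List.getElem_zipWith]
    rw [List.getD_eq_getElem _ _ hc', List.getD_eq_getElem _ _ (by omega : c < r.length)]

theorem pv_B_eq_map (grid : List (List Int))
    (h : ∀ row ∈ grid, (grid.headD []).length ≤ row.length) :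
    findColumnWidth_alt grid
      = (PySem.List.pyRange 0 (PySem.List.len (PySem.List.pyGetD grid 0 [])) 1).map
          (pvColMax grid) := by
  show grid.foldl (fun ret row => List.zipWith (fun m x => max m (pvW x)) ret row)
        (List.replicate (PySem.List.len (PySem.List.pyGetD grid 0 [])).toNat 0)
      = _
  have hlen0 : (PySem.List.len (PySem.List.pyGetD grid 0 [])).toNat = (grid.headD []).length := by
    cases grid <;> simp [PySem.List.pyGetD]
  rw [pv_zip_fold _ _ (by rw [List.length_replicate, hlen0]; exact h)]
  rw [List.length_replicate, hlen0]
  have : PySem.List.len (PySem.List.pyGetD grid 0 []) = ((grid.headD []).length : Int) := by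
    rw [← hlen0]; simp
  rw [this, PySem.List.pyRange_zero_natCast, List.map_map]
  apply List.map_congr_left
  intro c hc
  have hc' : c < (grid.headD []).length := List.mem_range.mp hc
  simp only [Function.comp]
  rw [List.getD_replicate _ hc']
  unfold pvColMax
  apply PySem.List.foldl_congr_mem
  intro m row _
  rw [PySem.List.pyGetD_natCast]

-- ===== VERDICT (by name: the statement is the Claim_ definition above) =====
theorem findColumnWidth_spec : Claim_equal_findColumnWidth := by
  intro grid _ hpre
  unfold Spec_findColumnWidth
  rw [pv_A_eq_map, pv_B_eq_map grid hpre.2]
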